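-- pv_equiv track=rewrite | github.com/lebedev2k/leetcode | 1624. Largest Substring Between Two Equal Characters.py | maxLengthBetweenEqualCharacters
-- ===== SOURCE A (Python) =====
-- def maxLengthBetweenEqualCharacters(s: str) -> int:
--     keys_doubles = set()
--     char_stat = {}
--     for i, c in enumerate(s):
--         if c in char_stat:
--             char_stat[c].append(i)
--             keys_doubles.add(c)
--         else:
--             char_stat[c] = [i]
--
--
--     if not keys_doubles:
--         return -1
--
--     max_length = 0
--     for key in keys_doubles:
--         length = max(char_stat[key])-min(char_stat[key])-1
--         max_length = max(max_length, length)
--     return max_length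
-- ===== SOURCE B (Python) =====
-- def maxLengthBetweenEqualCharacters(s: str) -> int:
--     first = {}
--     ans = -1
--     for i, c in enumerate(s):
--         if c in first:
--             ans = max(ans, i - first[c] - 1)
--         else:
--             first[c] = i
--     return ans
-- ===== Notes on version B (the rewrite author's own statement) =====
-- stated objective: simpler
-- what changed: One pass keeping only each character's first index and a running max (init -1), instead of building per-character index lists plus a set of repeated keys and rescanning them with max/min in a second loop.
import Mathlib
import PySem

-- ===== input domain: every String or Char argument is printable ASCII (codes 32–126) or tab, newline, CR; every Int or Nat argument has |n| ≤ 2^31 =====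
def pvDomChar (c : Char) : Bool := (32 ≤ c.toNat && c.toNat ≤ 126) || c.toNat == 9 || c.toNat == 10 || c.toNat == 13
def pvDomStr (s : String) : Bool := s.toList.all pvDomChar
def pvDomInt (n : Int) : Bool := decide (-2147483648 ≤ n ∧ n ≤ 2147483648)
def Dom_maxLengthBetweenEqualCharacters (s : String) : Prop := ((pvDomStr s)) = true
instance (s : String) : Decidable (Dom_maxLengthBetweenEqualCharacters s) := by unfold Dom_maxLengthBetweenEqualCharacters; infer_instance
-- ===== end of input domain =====

-- B replaces A's per-character index lists + second loop over repeated keys by a single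
-- pass keeping each character's first index and a running max (objective: simpler).

-- ===== PORT A =====
-- char_stat[key] is keyed only at keys of keys_doubles, so the key is always present and
-- its list nonempty: the `.getD` defaults below are never taken and the port is exact.
def aScore (cs : PySem.Dict Char (List Int)) (k : Char) : Int :=
  let L := (cs.get? k).getD []
  (PySem.List.max? L (fun x => x)).getD 0 - (PySem.List.min? L (fun x => x)).getD 0 - 1

-- loop body: if c in char_stat: char_stat[c].append(i); keys_doubles.add(c) else char_stat[c] = [i]
def stepA (p : PySem.Dict Char (List Int) × PySem.Set Char) (ic : Int × Char) :
    PySem.Dict Char (List Int) × PySem.Set Char :=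
  if p.1.contains ic.2 then
    (p.1.modify ic.2 [] (fun L => L ++ [ic.1]), PySem.Set.add p.2 ic.2)
  else
    (p.1.insert ic.2 [ic.1], p.2)

-- Python iterates keys_doubles (a set) in hash order; the running max is order-independent,
-- so folding the PySem.Set's list is exact.
def maxLengthBetweenEqualCharacters (s : String) : Int :=
  let st := (PySem.List.enumerate s.toList 0).foldl stepA (PySem.Dict.empty, PySem.Set.empty)
  if st.2.isEmpty then -1
  else st.2.foldl (fun m k => max m (aScore st.1 k)) 0

-- ===== PORT B =====
-- loop body: if c in first: ans = max(ans, i - first[c] - 1) else first[c] = i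
def stepB (p : PySem.Dict Char Int × Int) (ic : Int × Char) : PySem.Dict Char Int × Int :=
  if p.1.contains ic.2 then
    (p.1, max p.2 (ic.1 - p.1.getD ic.2 0 - 1))
  else
    (p.1.insert ic.2 ic.1, p.2)

def maxLengthBetweenEqualCharacters_alt (s : String) : Int :=
  ((PySem.List.enumerate s.toList 0).foldl stepB (PySem.Dict.empty, -1)).2

-- ===== PRECONDITION & SPEC =====
def Spec_maxLengthBetweenEqualCharacters (s : String) (out : Int) : Prop := out = maxLengthBetweenEqualCharacters_alt s
instance (s : String) (out : Int) : Decidable (Spec_maxLengthBetweenEqualCharacters s out) := by unfold Spec_maxLengthBetweenEqualCharacters; infer_instance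

-- ===== CLAIM (what is proved, stated in full; the proofs are below) =====
def Claim_equal_maxLengthBetweenEqualCharacters : Prop := ∀ (s : String), Dom_maxLengthBetweenEqualCharacters s → Spec_maxLengthBetweenEqualCharacters s (maxLengthBetweenEqualCharacters s)

-- ===== LEMMAS AND PROOFS =====

-- elementary facts about running-max/min folds over Int lists
lemma init_le_foldl_max : ∀ (t : List Int) (a : Int), a ≤ t.foldl max a := by
  intro t; induction t with
  | nil => intro a; simp
  | cons y t ih => intro a; simp only [List.foldl]
                   exact le_trans (le_max_left a y) (ih (max a y))

lemma mem_le_foldl_max : ∀ (t : List Int) (a y : Int), y ∈ t → y ≤ t.foldl max a := by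
  intro t; induction t with
  | nil => intro a y h; simp at h
  | cons z t ih =>
      intro a y h
      rcases List.mem_cons.mp h with h | h
      · subst h; exact le_trans (le_max_right a y) (init_le_foldl_max t _)
      · exact ih _ y h

lemma foldl_max_le : ∀ (t : List Int) (a b : Int), a ≤ b → (∀ y ∈ t, y ≤ b) → t.foldl max a ≤ b := by
  intro t; induction t with
  | nil => intro a b h _; simpa using h
  | cons z t ih =>
      intro a b h hall
      simp only [List.foldl]
      exact ih _ b (max_le h (hall z (List.mem_cons_self))) (fun y hy => hall y (List.mem_cons_of_mem _ hy))

lemma foldl_min_const : ∀ (t : List Int) (a : Int), (∀ y ∈ t, a ≤ y) → t.foldl min a = a := by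
  intro t; induction t with
  | nil => intro a _; rfl
  | cons z t ih =>
      intro a h
      simp only [List.foldl]
      rw [min_eq_left (h z (List.mem_cons_self))]
      exact ih a (fun y hy => h y (List.mem_cons_of_mem _ hy))

-- facts about the running max G v a l = l.foldl (fun m k => max m (v k)) a
lemma G_init_le (v : Char → Int) : ∀ (l : List Char) (a : Int), a ≤ l.foldl (fun m k => max m (v k)) a := by
  intro l; induction l with
  | nil => intro a; simp
  | cons k l ih => intro a; exact le_trans (le_max_left a (v k)) (ih (max a (v k)))

lemma G_mem_le (v : Char → Int) : ∀ (l : List Char) (a : Int) (k : Char), k ∈ l → v k ≤ l.foldl (fun m c => max m (v c)) a := by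
  intro l; induction l with
  | nil => intro a k h; simp at h
  | cons z l ih =>
      intro a k h
      rcases List.mem_cons.mp h with h | h
      · subst h; exact le_trans (le_max_right a (v k)) (G_init_le v l _)
      · exact ih _ k h

lemma G_le (v : Char → Int) : ∀ (l : List Char) (a b : Int), a ≤ b → (∀ k ∈ l, v k ≤ b) → l.foldl (fun m c => max m (v c)) a ≤ b := by
  intro l; induction l with
  | nil => intro a b h _; simpa using h
  | cons z l ih =>
      intro a b h hall
      exact ih _ b (max_le h (hall z (List.mem_cons_self))) (fun k hk => hall k (List.mem_cons_of_mem _ hk))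

lemma G_congr (v w : Char → Int) : ∀ (l : List Char) (a : Int), (∀ k ∈ l, v k = w k) → l.foldl (fun m c => max m (v c)) a = l.foldl (fun m c => max m (w c)) a := by
  intro l; induction l with
  | nil => intro a _; rfl
  | cons z l ih =>
      intro a h
      simp only [List.foldl]
      rw [h z (List.mem_cons_self)]
      exact ih _ (fun k hk => h k (List.mem_cons_of_mem _ hk))

-- the coupling invariant between the two loops' states
structure PVInv (n : Int) (cs : PySem.Dict Char (List Int)) (kd : PySem.Set Char)
    (fd : PySem.Dict Char Int) (ans : Int) : Prop where
  keys : ∀ c, fd.contains c = cs.contains c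
  shape : ∀ c, cs.contains c = true →
    ∃ hd tl, (cs.get? c).getD [] = hd :: tl ∧ fd.getD c 0 = hd ∧ hd < n ∧ ∀ x ∈ tl, hd < x ∧ x < n
  doub : ∀ c, c ∈ kd ↔ (cs.contains c = true ∧ 2 ≤ ((cs.get? c).getD []).length)
  ans_eq : ans = kd.foldl (fun m k => max m (aScore cs k)) (-1)

lemma aScore_cons (cs : PySem.Dict Char (List Int)) (k : Char) (hd : Int) (tl : List Int)
    (h : (cs.get? k).getD [] = hd :: tl) (hmin : ∀ x ∈ tl, hd ≤ x) :
    aScore cs k = tl.foldl max hd - hd - 1 := by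
  simp only [aScore, h, PySem.List.max?_id_cons, PySem.List.min?_id_cons, Option.getD_some]
  rw [foldl_min_const tl hd hmin]

lemma inv_init : PVInv 0 PySem.Dict.empty PySem.Set.empty PySem.Dict.empty (-1) := by
  refine ⟨?_, ?_, ?_, ?_⟩
  · intro c; rfl
  · intro c hc; simp [PySem.Dict.contains_empty] at hc
  · intro c; simp [PySem.Set.empty, PySem.Dict.contains_empty]
  · rfl

lemma inv_step (x : Char) (n : Int) (cs : PySem.Dict Char (List Int)) (kd : PySem.Set Char)
    (fd : PySem.Dict Char Int) (ans : Int) (hinv : PVInv n cs kd fd ans) :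
    PVInv (n + 1) (stepA (cs, kd) (n, x)).1 (stepA (cs, kd) (n, x)).2
        (stepB (fd, ans) (n, x)).1 (stepB (fd, ans) (n, x)).2 := by
  by_cases hc : cs.contains x = true
  · -- repeated character
    have hfc : fd.contains x = true := by rw [hinv.keys]; exact hc
    simp only [stepA, stepB, hc, hfc, if_true]
    obtain ⟨hd, tl, hL, hfd, hhd, htl⟩ := hinv.shape x hc
    have hget : ∀ c, ((cs.modify x [] (fun L => L ++ [n])).get? c).getD [] =
        if c = x then (cs.get? c).getD [] ++ [n] else (cs.get? c).getD [] := by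
      intro c
      rw [← PySem.Dict.getD_eq_get?_getD, ← PySem.Dict.getD_eq_get?_getD,
        PySem.Dict.getD_modify]
      split_ifs with h
      · subst h; rfl
      · rfl
    have hcont : ∀ c, (cs.modify x [] (fun L => L ++ [n])).contains c = cs.contains c := by
      intro c; rw [PySem.Dict.contains_modify]
      by_cases h : c = x
      · subst h; simp [hc]
      · simp [h]
    -- scores after the update
    have hmin : ∀ y ∈ tl ++ [n], hd ≤ y := by
      intro y hy
      rcases List.mem_append.mp hy with hy | hy
      · exact le_of_lt (htl y hy).1
      · simp at hy; omega
    have hLnew : ((cs.modify x [] (fun L => L ++ [n])).get? x).getD [] = hd :: (tl ++ [n]) := by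
      rw [hget x, if_pos rfl, hL]; rfl
    have hfold : (tl ++ [n]).foldl max hd = n := by
      rw [List.foldl_append]
      have h1 : tl.foldl max hd ≤ n :=
        foldl_max_le tl hd n (le_of_lt hhd) (fun y hy => le_of_lt (htl y hy).2)
      simp only [List.foldl]
      omega
    have sx' : aScore (cs.modify x [] (fun L => L ++ [n])) x = n - hd - 1 := by
      rw [aScore_cons _ x hd (tl ++ [n]) hLnew hmin, hfold]
    have sother : ∀ k, k ≠ x → aScore (cs.modify x [] (fun L => L ++ [n])) k = aScore cs k := by
      intro k hk; simp only [aScore]; rw [hget k, if_neg hk]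
    have sx_le : aScore cs x ≤ n - hd - 1 := by
      rw [aScore_cons cs x hd tl hL (fun y hy => le_of_lt (htl y hy).1)]
      have h1 : tl.foldl max hd ≤ n :=
        foldl_max_le tl hd n (le_of_lt hhd) (fun y hy => le_of_lt (htl y hy).2)
      omega
    refine ⟨?_, ?_, ?_, ?_⟩
    · intro c; rw [hinv.keys, hcont]
    · intro c hcc
      rw [hcont] at hcc
      by_cases hcx : c = x
      · subst hcx
        refine ⟨hd, tl ++ [n], hLnew, hfd, by omega, ?_⟩
        intro y hy
        rcases List.mem_append.mp hy with hy | hy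
        · exact ⟨(htl y hy).1, by have := (htl y hy).2; omega⟩
        · simp at hy; omega
      · obtain ⟨hd', tl', hL', hfd', hhd', htl'⟩ := hinv.shape c hcc
        refine ⟨hd', tl', by rw [hget c, if_neg hcx]; exact hL', hfd', by omega, ?_⟩
        intro y hy; have := htl' y hy; exact ⟨this.1, by omega⟩
    · intro c
      rw [PySem.Set.mem_add]
      by_cases hcx : c = x
      · subst hcx
        constructor
        · intro _
          refine ⟨by rw [hcont]; exact hc, ?_⟩
          rw [hLnew]; simp
        · intro _; right; rfl
      · constructor
        · intro h
          rcases h with h | h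
          · have := (hinv.doub c).mp h
            rw [hcont, hget c, if_neg hcx]
            exact this
          · exact absurd h hcx
        · intro h
          rw [hcont, hget c, if_neg hcx] at h
          exact Or.inl ((hinv.doub c).mpr h)
    · -- the running max
      rw [hfd, hinv.ans_eq]
      by_cases hx : x ∈ kd
      · rw [PySem.Set.add_of_mem hx]
        apply le_antisymm
        · apply max_le
          · apply G_le
            · exact G_init_le _ kd (-1)
            · intro k hk
              by_cases hkx : k = x
              · subst hkx
                exact le_trans sx_le (by rw [← sx']; exact G_mem_le _ kd (-1) k hk)
              · rw [← sother k hkx]; exact G_mem_le _ kd (-1) k hk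
          · rw [← sx']; exact G_mem_le _ kd (-1) x hx
        · apply G_le
          · exact le_trans (G_init_le _ kd (-1)) (le_max_left _ _)
          · intro k hk
            by_cases hkx : k = x
            · subst hkx; rw [sx']; exact le_max_right _ _
            · rw [sother k hkx]
              exact le_trans (G_mem_le _ kd (-1) k hk) (le_max_left _ _)
      · rw [PySem.Set.add_of_not_mem hx, List.foldl_append]
        simp only [List.foldl]
        rw [sx', G_congr _ _ kd (-1) (fun k hk => sother k (fun h => hx (h ▸ hk)))]
  · -- new character
    have hcf : cs.contains x = false := by simpa using hc
    have hfc : fd.contains x = false := by rw [hinv.keys]; exact hcf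
    simp only [stepA, stepB, hcf, hfc, if_false, Bool.false_eq_true]
    have hget : ∀ c, c ≠ x → ((cs.insert x [n]).get? c).getD [] = (cs.get? c).getD [] := by
      intro c hcx; rw [PySem.Dict.get?_insert, if_neg hcx]
    refine ⟨?_, ?_, ?_, ?_⟩
    · intro c; rw [PySem.Dict.contains_insert, PySem.Dict.contains_insert, hinv.keys]
    · intro c hcc
      by_cases hcx : c = x
      · subst hcx
        refine ⟨n, [], ?_, ?_, by omega, by simp⟩
        · rw [PySem.Dict.get?_insert_self]; rfl
        · rw [PySem.Dict.getD_insert_self]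
      · rw [PySem.Dict.contains_insert] at hcc
        have hcc' : cs.contains c = true := by
          simpa [hcx] using hcc
        obtain ⟨hd', tl', hL', hfd', hhd', htl'⟩ := hinv.shape c hcc'
        refine ⟨hd', tl', by rw [hget c hcx]; exact hL',
          by rw [PySem.Dict.getD_insert, if_neg hcx]; exact hfd', by omega, ?_⟩
        intro y hy; have := htl' y hy; exact ⟨this.1, by omega⟩
    · intro c
      by_cases hcx : c = x
      · subst hcx
        constructor
        · intro h
          have h2 := ((hinv.doub c).mp h).1
          rw [h2] at hcf; cases hcf
        · intro h
          rw [PySem.Dict.get?_insert_self] at h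
          simp at h
        -- both directions are vacuous: x was unseen, and [n] has length 1
      · rw [hinv.doub c, PySem.Dict.contains_insert, hget c hcx]
        have : (c == x) = false := by simp [hcx]
        rw [this]; simp
    · rw [hinv.ans_eq]
      apply G_congr
      intro k hk
      have hkx : k ≠ x := by
        intro h; subst h
        have h2 := ((hinv.doub k).mp hk).1
        rw [h2] at hcf; cases hcf
      simp only [aScore]; rw [hget k hkx]

lemma inv_run (l : List Char) : ∀ (n : Int) (cs : PySem.Dict Char (List Int)) (kd : PySem.Set Char)
    (fd : PySem.Dict Char Int) (ans : Int), PVInv n cs kd fd ans →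
    PVInv (n + l.length)
      ((PySem.List.enumerate l n).foldl stepA (cs, kd)).1
      ((PySem.List.enumerate l n).foldl stepA (cs, kd)).2
      ((PySem.List.enumerate l n).foldl stepB (fd, ans)).1
      ((PySem.List.enumerate l n).foldl stepB (fd, ans)).2 := by
  induction l with
  | nil => intro n cs kd fd ans h; simpa [PySem.List.enumerate_nil] using h
  | cons x l ih =>
      intro n cs kd fd ans h
      have h1 := inv_step x n cs kd fd ans h
      have h2 := ih (n + 1) _ _ _ _ h1
      simp only [PySem.List.enumerate_cons, List.foldl_cons, List.length_cons]
      have harith : n + ((l.length + 1 : Nat) : Int) = n + 1 + l.length := by push_cast; ring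
      rw [harith]
      exact h2

lemma aScore_nonneg (n : Int) (cs : PySem.Dict Char (List Int)) (kd : PySem.Set Char)
    (fd : PySem.Dict Char Int) (ans : Int) (hinv : PVInv n cs kd fd ans)
    (k : Char) (hk : k ∈ kd) : 0 ≤ aScore cs k := by
  obtain ⟨hc, hlen⟩ := (hinv.doub k).mp hk
  obtain ⟨hd, tl, hL, _, _, htl⟩ := hinv.shape k hc
  rw [aScore_cons cs k hd tl hL (fun x hx => le_of_lt (htl x hx).1)]
  rw [hL] at hlen
  match tl, hlen with
  | y :: tl', _ =>
      have hy : hd < y := (htl y (List.mem_cons_self)).1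
      have := mem_le_foldl_max (y :: tl') hd y (List.mem_cons_self)
      omega

lemma inv_final (n : Int) (cs : PySem.Dict Char (List Int)) (kd : PySem.Set Char)
    (fd : PySem.Dict Char Int) (ans : Int) (hinv : PVInv n cs kd fd ans) :
    (if kd.isEmpty then -1 else kd.foldl (fun m k => max m (aScore cs k)) 0) = ans := by
  rw [hinv.ans_eq]
  match kd, hinv with
  | [], _ => rfl
  | k :: t, hinv =>
      have h0 : 0 ≤ aScore cs k := aScore_nonneg n cs (k :: t) fd ans hinv k (List.mem_cons_self)
      simp only [List.isEmpty_cons, Bool.false_eq_true, if_false, List.foldl_cons]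
      have hmax : max (0 : Int) (aScore cs k) = max (-1) (aScore cs k) := by omega
      rw [hmax]

-- ===== VERDICT (by name: the statement is the Claim_ definition above) =====
theorem maxLengthBetweenEqualCharacters_spec : Claim_equal_maxLengthBetweenEqualCharacters := by
  intro s _
  unfold Spec_maxLengthBetweenEqualCharacters maxLengthBetweenEqualCharacters maxLengthBetweenEqualCharacters_alt
  have h := inv_run s.toList 0 PySem.Dict.empty PySem.Set.empty PySem.Dict.empty (-1) inv_init
  exact inv_final _ _ _ _ _ h
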